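-- pv_equiv track=rewrite | github.com/adamg8539/dsa | dsa-problems/hashmaps-and-sets/geometric-triplet-count/geometric-triplet.py | geometric_sequence_triplets
-- ===== SOURCE A (Python) =====
-- from typing import List
--
-- def geometric_sequence_triplets(nums: List[int], r: int) -> int:
--     # Write your code here
--     pass
--     numsMap = {}
--     for x,y in enumerate(nums):
--         if (y in numsMap):
--             numsMap[y].append(x)
--             continue
--         numsMap[y] = [x]
--     output = 0
--     for w, x in enumerate(nums):
--         if (r*x in numsMap):
--             for a in numsMap[r*x]:
--                 if a > w:
--                     if (r*r*x in numsMap):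
--                         for b in numsMap[r*r*x]:
--                             if b > a:
--                                 output += 1
--     return output
-- ===== SOURCE B (Python) =====
-- from typing import List
--
-- def geometric_sequence_triplets(nums: List[int], r: int) -> int:
--     # One pass: ones[v] = #prefix elements whose next needed value is v;
--     # twos[v] = #pairs (w,a) already seen whose next needed value is v.
--     ones = {}
--     twos = {}
--     ans = 0
--     for y in nums:
--         ans += twos.get(y, 0)
--         twos[r * y] = twos.get(r * y, 0) + ones.get(y, 0)
--         ones[r * y] = ones.get(r * y, 0) + 1
--     return ans
-- ===== Notes on version B (the rewrite author's own statement) =====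
-- stated objective: alternative
-- what changed: Replaces A's value->index-list map with nested scans over per-value index lists by a single left-to-right pass maintaining two counting dicts (elements awaiting a middle, pairs awaiting a completion) and summing completed pairs per element; A's nested scans can be quadratic/cubic on duplicate-heavy input while B is one linear pass, but on duplicate-free inputs A's inner loops rarely fire, so no speed is claimed.
import Mathlib
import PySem

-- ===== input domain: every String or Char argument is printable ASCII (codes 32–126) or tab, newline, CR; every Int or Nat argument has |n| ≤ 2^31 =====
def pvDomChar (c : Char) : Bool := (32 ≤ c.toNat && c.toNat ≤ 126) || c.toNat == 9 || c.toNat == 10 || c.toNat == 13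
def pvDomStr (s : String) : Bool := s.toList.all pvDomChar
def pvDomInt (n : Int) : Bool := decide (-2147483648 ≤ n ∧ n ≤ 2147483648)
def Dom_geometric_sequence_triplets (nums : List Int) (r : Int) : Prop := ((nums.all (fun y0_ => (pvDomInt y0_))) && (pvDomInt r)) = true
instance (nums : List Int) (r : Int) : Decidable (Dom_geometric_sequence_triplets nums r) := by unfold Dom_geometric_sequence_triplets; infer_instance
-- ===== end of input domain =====

-- B replaces A's value->index-list map with nested scans by a single left-to-right pass over two
-- counting dicts (elements awaiting a middle, pairs awaiting a completion); a different algorithm, not timed faster.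

-- ===== PORT A =====
def geometric_sequence_triplets (nums : List Int) (r : Int) : Int :=
  -- numsMap: value -> list of indices at which it occurs (append if present, else fresh singleton)
  let numsMap : PySem.Dict Int (List Int) :=
    (PySem.List.enumerate nums).foldl
      (fun d p =>
        if d.contains p.2 then d.modify p.2 [] (fun l => l ++ [p.1])
        else d.insert p.2 [p.1])
      PySem.Dict.empty
  (PySem.List.enumerate nums).foldl
    (fun output q =>
      if numsMap.contains (r * q.2) then
        (numsMap.getD (r * q.2) []).foldl
          (fun output a =>
            if a > q.1 then
              if numsMap.contains (r * r * q.2) then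
                (numsMap.getD (r * r * q.2) []).foldl
                  (fun output b => if b > a then output + 1 else output)
                  output
              else output
            else output)
          output
      else output)
    0

-- ===== PORT B =====
def geometric_sequence_triplets_alt (nums : List Int) (r : Int) : Int :=
  -- single pass; state = (ones, twos, ans)
  let st :=
    nums.foldl
      (fun (st : PySem.Dict Int Int × PySem.Dict Int Int × Int) y =>
        let ones := st.1
        let twos := st.2.1
        let ans := st.2.2 + twos.getD y 0
        let twos' := twos.insert (r * y) (twos.getD (r * y) 0 + ones.getD y 0)
        let ones' := ones.insert (r * y) (ones.getD (r * y) 0 + 1)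
        (ones', twos', ans))
      (PySem.Dict.empty, PySem.Dict.empty, 0)
  st.2.2

-- ===== PRECONDITION & SPEC =====
def Spec_geometric_sequence_triplets (nums : List Int) (r : Int) (out : Int) : Prop := out = geometric_sequence_triplets_alt nums r
instance (nums : List Int) (r : Int) (out : Int) : Decidable (Spec_geometric_sequence_triplets nums r out) := by unfold Spec_geometric_sequence_triplets; infer_instance

-- ===== CLAIM (what is proved, stated in full; the proofs are below) =====
def Claim_equal_geometric_sequence_triplets : Prop := ∀ (nums : List Int) (r : Int), Dom_geometric_sequence_triplets nums r → Spec_geometric_sequence_triplets nums r (geometric_sequence_triplets nums r)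

-- ===== LEMMAS AND PROOFS =====

-- Common specification: pairCnt t u v = # ordered pairs j<k in t with t[j]=u, t[k]=v;
-- T r l = # ordered triples i<j<k with l[j]=r*l[i], l[k]=r*r*l[i].
def pairCnt : List Int → Int → Int → Int
  | [], _, _ => 0
  | y :: t, u, v => (if y = u then (t.count v : Int) else 0) + pairCnt t u v

def T (r : Int) : List Int → Int
  | [] => 0
  | y :: t => pairCnt t (r * y) (r * r * y) + T r t


-- ---------- B side: the single pass counts T ----------

def funS (r : Int) : List Int → (Int → Int) → (Int → Int) → Int
  | [], _, _ => 0
  | y :: t, g, f =>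
      g y + funS r t (fun v => if v = r * y then g v + f y else g v)
                     (fun v => if v = r * y then f v + 1 else f v)

def sumG : List Int → (Int → Int) → Int
  | [], _ => 0
  | y :: t, g => g y + sumG t g

def sumF (r : Int) : List Int → (Int → Int) → Int
  | [], _ => 0
  | y :: t, f => (t.count (r * y) : Int) * f y + sumF r t f

lemma loopB_eq (r : Int) (l : List Int) (ones twos : PySem.Dict Int Int) (ans : Int) :
    (l.foldl
      (fun (st : PySem.Dict Int Int × PySem.Dict Int Int × Int) y =>
        let ones := st.1
        let twos := st.2.1
        let ans := st.2.2 + twos.getD y 0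
        let twos' := twos.insert (r * y) (twos.getD (r * y) 0 + ones.getD y 0)
        let ones' := ones.insert (r * y) (ones.getD (r * y) 0 + 1)
        (ones', twos', ans))
      (ones, twos, ans)).2.2
    = ans + funS r l (fun v => twos.getD v 0) (fun v => ones.getD v 0) := by
  induction l generalizing ones twos ans with
  | nil => simp [funS]
  | cons y t ih =>
      simp only [List.foldl_cons, funS]
      rw [ih]
      have hg : (fun v => (twos.insert (r * y) (twos.getD (r * y) 0 + ones.getD y 0)).getD v 0)
          = fun v => if v = r * y then twos.getD v 0 + ones.getD y 0 else twos.getD v 0 := by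
        funext v
        rw [PySem.Dict.getD_insert]
        split_ifs with h <;> simp [h]
      have hf : (fun v => (ones.insert (r * y) (ones.getD (r * y) 0 + 1)).getD v 0)
          = fun v => if v = r * y then ones.getD v 0 + 1 else ones.getD v 0 := by
        funext v
        rw [PySem.Dict.getD_insert]
        split_ifs with h <;> simp [h]
      rw [hg, hf]
      ring

lemma sumG_update (t : List Int) (g : Int → Int) (c d : Int) :
    sumG t (fun v => if v = c then g v + d else g v)
      = sumG t g + (t.count c : Int) * d := by
  induction t with
  | nil => simp [sumG]
  | cons z s ih =>
      simp only [sumG, ih, List.count_cons]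
      by_cases h : z = c <;> simp [h] <;> ring

lemma sumF_update (r : Int) (t : List Int) (f : Int → Int) (c : Int) :
    sumF r t (fun v => if v = c then f v + 1 else f v)
      = sumF r t f + pairCnt t c (r * c) := by
  induction t with
  | nil => simp [sumF, pairCnt]
  | cons z s ih =>
      simp only [sumF, ih, pairCnt]
      by_cases h : z = c <;> simp [h] <;> ring

lemma funS_eq (r : Int) (l : List Int) (g f : Int → Int) :
    funS r l g f = sumG l g + sumF r l f + T r l := by
  induction l generalizing g f with
  | nil => simp [funS, sumG, sumF, T]
  | cons y t ih =>
      simp only [funS, sumG, sumF, T, ih, sumG_update, sumF_update]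
      have : r * (r * y) = r * r * y := by ring
      rw [this]
      ring

lemma sumG_zero (l : List Int) : sumG l (fun _ => 0) = 0 := by
  induction l with
  | nil => rfl
  | cons y t ih => simp [sumG, ih]

lemma sumF_zero (r : Int) (l : List Int) : sumF r l (fun _ => 0) = 0 := by
  induction l with
  | nil => rfl
  | cons y t ih => simp [sumF, ih]

lemma B_eq_T (nums : List Int) (r : Int) :
    geometric_sequence_triplets_alt nums r = T r nums := by
  unfold geometric_sequence_triplets_alt
  rw [loopB_eq]
  have h0 : (fun v => (PySem.Dict.empty : PySem.Dict Int Int).getD v 0) = fun _ => (0 : Int) := by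
    funext v; simp [PySem.Dict.getD_empty]
  rw [h0, funS_eq, sumG_zero, sumF_zero]
  ring

-- ---------- A side: the index-map triple scan counts T ----------

-- index list of a value in nums
def idxOf (nums : List Int) (v : Int) : List Int :=
  ((PySem.List.enumerate nums).filter (fun p => p.2 == v)).map (fun p => p.1)

lemma cnt_enum (l : List Int) (s : Int) (v : Int) :
    ((PySem.List.enumerate l s).filter (fun p => p.2 == v)).length = l.count v := by
  induction l generalizing s with
  | nil => simp [PySem.List.enumerate_nil]
  | cons y t ih =>
      rw [PySem.List.enumerate_cons]
      by_cases h : y = v <;> simp [h, ih]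

lemma enum_fst_bounds {α : Type} (l : List α) (s : Int) (p : Int × α)
    (hp : p ∈ PySem.List.enumerate l s) : s ≤ p.1 ∧ p.1 < s + l.length := by
  rw [PySem.List.mem_enumerate_iff] at hp
  obtain ⟨k, hk, rfl⟩ := hp
  constructor
  · omega
  · omega

lemma idx_filter_gt (pre rest : List Int) (v w : Int) (hw : (pre.length : Int) = w + 1) :
    (idxOf (pre ++ rest) v).filter (fun a => decide (w < a))
      = ((PySem.List.enumerate rest (pre.length : Int)).filter (fun p => p.2 == v)).map (fun p => p.1) := by
  have hsplit : PySem.List.enumerate (pre ++ rest) 0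
      = PySem.List.enumerate pre 0 ++ PySem.List.enumerate rest ((pre.length : Int)) := by
    rw [PySem.List.enumerate_append]; norm_num
  unfold idxOf
  rw [hsplit, List.filter_append, List.map_append, List.filter_append]
  have h1 : ((((PySem.List.enumerate pre 0).filter (fun p => p.2 == v)).map (fun p => p.1)).filter
      (fun a => decide (w < a))) = [] := by
    rw [List.filter_eq_nil_iff]
    intro a ha
    simp only [List.mem_map, List.mem_filter] at ha
    obtain ⟨p, ⟨hp, _⟩, rfl⟩ := ha
    have := enum_fst_bounds pre 0 p hp
    simp only [decide_eq_true_eq, not_lt]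
    omega
  have h2 : ((((PySem.List.enumerate rest ((pre.length : Int))).filter (fun p => p.2 == v)).map
      (fun p => p.1)).filter (fun a => decide (w < a)))
      = ((PySem.List.enumerate rest ((pre.length : Int))).filter (fun p => p.2 == v)).map (fun p => p.1) := by
    rw [List.filter_eq_self]
    intro a ha
    simp only [List.mem_map, List.mem_filter] at ha
    obtain ⟨p, ⟨hp, _⟩, rfl⟩ := ha
    have := enum_fst_bounds rest ((pre.length : Int)) p hp
    simp only [decide_eq_true_eq]
    omega
  rw [h1, h2, List.nil_append]

lemma idx_countP_gt (nums pre rest : List Int) (v w : Int) (h : nums = pre ++ rest)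
    (hw : (pre.length : Int) = w + 1) :
    ((idxOf nums v).countP (fun b => decide (w < b)) : Int) = rest.count v := by
  rw [h, List.countP_eq_length_filter, idx_filter_gt pre rest v w hw, List.length_map, cnt_enum]

lemma middle_sum (nums pre rest : List Int) (u v : Int) (h : nums = pre ++ rest) :
    (((PySem.List.enumerate rest (pre.length : Int)).filter (fun p => p.2 == u)).map
        (fun p => ((idxOf nums v).countP (fun b => decide (p.1 < b)) : Int))).sum
      = pairCnt rest u v := by
  induction rest generalizing pre with
  | nil => simp [PySem.List.enumerate_nil, pairCnt]
  | cons z rest2 ih =>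
      rw [PySem.List.enumerate_cons]
      have hpre2 : ((pre ++ [z]).length : Int) = (pre.length : Int) + 1 := by simp
      have hnums : nums = (pre ++ [z]) ++ rest2 := by simp [h]
      have htail := ih (pre ++ [z]) hnums
      rw [hpre2] at htail
      by_cases hz : z = u
      · simp only [List.filter_cons, hz, beq_self_eq_true, if_true, List.map_cons, List.sum_cons]
        rw [htail,
          idx_countP_gt nums (pre ++ [z]) rest2 v (pre.length : Int) hnums hpre2]
        simp [pairCnt]
      · simp only [List.filter_cons, beq_iff_eq, hz, if_false]
        rw [htail]
        simp [pairCnt, hz]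

lemma outer_sum (nums pre rest : List Int) (r : Int) (h : nums = pre ++ rest) :
    ((PySem.List.enumerate rest (pre.length : Int)).map
        (fun q => (((idxOf nums (r * q.2)).filter (fun a => decide (q.1 < a))).map
            (fun a => ((idxOf nums (r * r * q.2)).countP (fun b => decide (a < b)) : Int))).sum)).sum
      = T r rest := by
  induction rest generalizing pre with
  | nil => simp [PySem.List.enumerate_nil, T]
  | cons y rest2 ih =>
      rw [PySem.List.enumerate_cons, List.map_cons, List.sum_cons]
      have hpre2 : ((pre ++ [y]).length : Int) = (pre.length : Int) + 1 := by simp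
      have hnums : nums = (pre ++ [y]) ++ rest2 := by simp [h]
      have htail := ih (pre ++ [y]) hnums
      rw [hpre2] at htail
      rw [htail]
      have hfilter := idx_filter_gt (pre ++ [y]) rest2 (r * y) (pre.length : Int) hpre2
      rw [← hnums] at hfilter
      rw [hfilter, hpre2, List.map_map]
      have := middle_sum nums (pre ++ [y]) rest2 (r * y) (r * r * y) hnums
      rw [hpre2] at this
      rw [show ((fun a => ((idxOf nums (r * r * y)).countP (fun b => decide (a < b)) : Int)) ∘ (fun (p : Int × Int) => p.1))
        = fun (p : Int × Int) => ((idxOf nums (r * r * y)).countP (fun b => decide (p.1 < b)) : Int) from rfl, this]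
      simp [T]

lemma numsMap_getD (nums : List Int) (v : Int) :
    ((PySem.List.enumerate nums).foldl
      (fun d p =>
        if d.contains p.2 then d.modify p.2 [] (fun l => l ++ [p.1])
        else d.insert p.2 [p.1])
      (PySem.Dict.empty : PySem.Dict Int (List Int))).getD v []
    = idxOf nums v := by
  have hfun : (fun (d : PySem.Dict Int (List Int)) (p : Int × Int) =>
        if d.contains p.2 then d.modify p.2 [] (fun l => l ++ [p.1])
        else d.insert p.2 [p.1])
      = fun d p => d.modify p.2 [] (fun l => l ++ [p.1]) := by
    funext d p
    by_cases h : d.contains p.2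
    · simp [h]
    · simp only [Bool.not_eq_true] at h
      simp [h, PySem.Dict.modify, PySem.Dict.getD_of_not_contains _ _ h]
  rw [hfun]
  have hmap : (PySem.List.enumerate nums).foldl
        (fun (d : PySem.Dict Int (List Int)) p => d.modify p.2 [] (fun l => l ++ [p.1]))
        PySem.Dict.empty
      = ((PySem.List.enumerate nums).map Prod.swap).foldl
        (fun d p => d.modify p.1 [] (fun l => l ++ [p.2])) PySem.Dict.empty := by
    rw [List.foldl_map]
    rfl
  rw [hmap, PySem.Dict.getD_foldl_modify_append]
  simp [idxOf, List.filter_map, Function.comp_def, Prod.swap]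

lemma sum_map_ite (l : List Int) (p : Int → Bool) (g : Int → Int) :
    (l.map (fun a => if p a then g a else 0)).sum = ((l.filter p).map g).sum := by
  induction l with
  | nil => rfl
  | cons x t ih => by_cases h : p x <;> simp [h, ih]

lemma A_eq_T (nums : List Int) (r : Int) :
    geometric_sequence_triplets nums r = T r nums := by
  simp only [geometric_sequence_triplets]
  set M := (PySem.List.enumerate nums).foldl
      (fun (d : PySem.Dict Int (List Int)) p =>
        if d.contains p.2 then d.modify p.2 [] (fun l => l ++ [p.1])
        else d.insert p.2 [p.1])
      PySem.Dict.empty with hM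
  have hL : ∀ v, M.getD v [] = idxOf nums v := fun v => numsMap_getD nums v
  have hstep : (fun (output : Int) (q : Int × Int) =>
      if M.contains (r * q.2) then
        (M.getD (r * q.2) []).foldl
          (fun output a =>
            if a > q.1 then
              if M.contains (r * r * q.2) then
                (M.getD (r * r * q.2) []).foldl
                  (fun output b => if b > a then output + 1 else output)
                  output
              else output
            else output)
          output
      else output)
      = fun output q => output +
          (((idxOf nums (r * q.2)).filter (fun a => decide (q.1 < a))).map
            (fun a => ((idxOf nums (r * r * q.2)).countP (fun b => decide (a < b)) : Int))).sum := by
    funext output q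
    have hmid : (fun (output : Int) (a : Int) =>
        if a > q.1 then
          if M.contains (r * r * q.2) then
            (idxOf nums (r * r * q.2)).foldl
              (fun output b => if b > a then output + 1 else output)
              output
          else output
        else output)
        = fun output a => output +
            (if decide (q.1 < a) then ((idxOf nums (r * r * q.2)).countP (fun b => decide (a < b)) : Int)
             else 0) := by
      funext output a
      by_cases ha : a > q.1
      · by_cases h2 : M.contains (r * r * q.2)
        · simp only [ha, if_true, h2]
          have : (fun (output : Int) (b : Int) => if b > a then output + 1 else output)
              = fun output b => if (fun b => decide (a < b)) b = true then output + 1 else output := by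
            funext o b; simp [gt_iff_lt]
          rw [this, PySem.List.foldl_count_if]
          simp
        · have hnil : idxOf nums (r * r * q.2) = [] := by
            rw [← hL, PySem.Dict.getD_of_not_contains _ _ (by simpa using h2)]
          simp [ha, h2, hnil]
      · simp [ha]
    by_cases h1 : M.contains (r * q.2)
    · simp only [h1, if_true]
      rw [hL, hmid, PySem.List.foldl_add, sum_map_ite, hL]
    · have hnil : idxOf nums (r * q.2) = [] := by
        rw [← hL, PySem.Dict.getD_of_not_contains _ _ (by simpa using h1)]
      simp [h1, hnil]
  rw [hstep, PySem.List.foldl_add]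
  have := outer_sum nums [] nums r (by simp)
  simp only [List.length_nil, Nat.cast_zero] at this
  rw [this]
  ring

-- ===== VERDICT (by name: the statement is the Claim_ definition above) =====
theorem geometric_sequence_triplets_spec : Claim_equal_geometric_sequence_triplets := by
  intro nums r _
  unfold Spec_geometric_sequence_triplets
  rw [A_eq_T, B_eq_T]
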